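-- pv_equiv track=rewrite | github.com/yqsy/pytest | pytest/multithread_download.py | slicing_file
-- ===== SOURCE A (Python) =====
-- def slicing_file(sumbytes, part):
--     """
--     将文件分割成整数字节单块的若干块,不整除的字节数放到末尾
--     :param sumbytes: 文件的总计字节数
--     :param part: 分割成多少部分
--     :return: [(begin,end), (begin,end)] , begin end 都是int型的
--     """
--     if part <= 0:
--         return []
--
--     each_part_bytes = sumbytes // part
--     remain_bytes = sumbytes - each_part_bytes * part
--
--     slice_rnt = []
--     for i in range(part):
--         begin = i * each_part_bytes
--         end = begin + each_part_bytes
--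
--         # last ele
--         if i == part - 1:
--             end = end + remain_bytes
--
--         # remove both 0
--         if begin == 0 and end == 0:
--             continue
--
--         slice_rnt.append((begin, end))
--
--     return slice_rnt
-- ===== SOURCE B (Python) =====
-- def slicing_file(sumbytes, part):
--     out = []
--     end, k = sumbytes, part
--     while k > 0:
--         begin = (k - 1) * (end // k)
--         if (begin, end) != (0, 0):
--             out.append((begin, end))
--         end, k = begin, k - 1
--     out.reverse()
--     return out
-- ===== Notes on version B (the rewrite author's own statement) =====
-- stated objective: alternative
-- what changed: Replaces A's forward index loop with precomputed chunk size and a remainder/last-element special case by a back-to-front while loop that rolls the slice end downward, re-deriving the chunk size as end//k each step (the first division absorbs the remainder automatically), appends in reverse order and reverses once; the part<=0 guard, the remainder variable and the last-element branch all disappear.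
import Mathlib
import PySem

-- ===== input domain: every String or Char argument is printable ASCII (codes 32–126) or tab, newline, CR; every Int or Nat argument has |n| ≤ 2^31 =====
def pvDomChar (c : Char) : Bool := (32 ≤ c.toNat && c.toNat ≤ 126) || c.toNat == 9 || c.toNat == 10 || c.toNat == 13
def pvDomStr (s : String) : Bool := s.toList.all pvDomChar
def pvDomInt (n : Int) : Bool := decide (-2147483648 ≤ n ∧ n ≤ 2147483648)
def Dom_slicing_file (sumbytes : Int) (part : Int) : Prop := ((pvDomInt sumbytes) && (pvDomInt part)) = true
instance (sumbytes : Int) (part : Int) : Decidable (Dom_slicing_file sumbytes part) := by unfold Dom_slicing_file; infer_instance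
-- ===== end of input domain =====

-- B builds the slices back-to-front with a rolling end and a re-derived quotient per step instead of A's forward loop with a remainder/last-element special case; alternative decomposition, same cost.


-- ===== PORT A =====
def slicing_file (sumbytes : Int) (part : Int) : List (Int × Int) :=
  if part ≤ 0 then []
  else
    let each_part_bytes := PySem.Int.floordiv sumbytes part
    let remain_bytes := sumbytes - each_part_bytes * part
    (PySem.List.pyRange 0 part 1).foldl (fun acc i =>
      let begin_ := i * each_part_bytes
      let end0 := begin_ + each_part_bytes
      let end_ := if i = part - 1 then end0 + remain_bytes else end0
      if begin_ = 0 ∧ end_ = 0 then acc else acc ++ [(begin_, end_)]) []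

-- ===== PORT B =====
-- the 'while k > 0' loop of Source B, state (end, k, out); recursion on k.toNat
def slicingAltLoop (endv : Int) (k : Int) (out : List (Int × Int)) : List (Int × Int) :=
  if h : 0 < k then
    let begin_ := (k - 1) * PySem.Int.floordiv endv k
    let out' := if (begin_, endv) = ((0 : Int), (0 : Int)) then out else out ++ [(begin_, endv)]
    slicingAltLoop begin_ (k - 1) out'
  else out
termination_by k.toNat
decreasing_by omega

def slicing_file_alt (sumbytes : Int) (part : Int) : List (Int × Int) :=
  (slicingAltLoop sumbytes part []).reverse

-- ===== PRECONDITION & SPEC =====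
def Spec_slicing_file (sumbytes : Int) (part : Int) (out : List (Int × Int)) : Prop := out = slicing_file_alt sumbytes part
instance (sumbytes : Int) (part : Int) (out : List (Int × Int)) : Decidable (Spec_slicing_file sumbytes part out) := by unfold Spec_slicing_file; infer_instance

-- ===== CLAIM (what is proved, stated in full; the proofs are below) =====
def Claim_equal_slicing_file : Prop := ∀ (sumbytes : Int) (part : Int), Dom_slicing_file sumbytes part → Spec_slicing_file sumbytes part (slicing_file sumbytes part)

-- ===== LEMMAS AND PROOFS =====

-- once the rolling end is an exact multiple k*e, every later quotient is e again:
-- the loop from state (k*e, k, out) produces out ++ reverse of the filtered slice list over range 0 k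
lemma slicingAltLoop_mult (e : Int) :
    ∀ (n : Nat) (k : Int), k.toNat = n → ∀ (out : List (Int × Int)),
      slicingAltLoop (k * e) k out
        = out ++ ((((PySem.List.pyRange 0 k 1).map (fun i => (i * e, (i + 1) * e))).filter
            (fun p => p ≠ ((0 : Int), (0 : Int)))).reverse) := by
  intro n
  induction n with
  | zero =>
    intro k hk out
    have hk0 : k ≤ 0 := by omega
    rw [slicingAltLoop]
    simp [show ¬ (0 < k) from by omega, PySem.List.pyRange_one_eq_nil hk0]
  | succ m ih =>
    intro k hk out
    have hkpos : 0 < k := by omega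
    rw [slicingAltLoop]
    simp only [dif_pos hkpos]
    have hdiv : PySem.Int.floordiv (k * e) k = e := by
      simp [PySem.Int.floordiv, Int.mul_fdiv_cancel_left _ (by omega : k ≠ 0)]
    rw [hdiv]
    have hrec := ih (k - 1) (by omega)
    rw [show (k - 1) * e = (k - 1) * e from rfl]
    rw [hrec]
    have hsplit : PySem.List.pyRange 0 k 1
        = PySem.List.pyRange 0 (k - 1) 1 ++ [k - 1] := by
      have h := PySem.List.pyRange_one_succ_right (show (0 : Int) ≤ k - 1 from by omega)
      rw [show k - 1 + 1 = k from by omega] at h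
      exact h
    rw [hsplit]
    simp only [List.map_append, List.filter_append, List.reverse_append, List.map_cons,
      List.map_nil, List.filter_cons, List.filter_nil]
    rw [show (k - 1 + 1) * e = k * e from by ring]
    by_cases hz : ((k - 1) * e, k * e) = ((0 : Int), (0 : Int))
    · simp [hz]
    · simp [hz]

-- A's loop (for part > 0) is a filtered map over the index range
lemma slicing_file_closed (sumbytes part : Int) (hp : 0 < part) :
    slicing_file sumbytes part
      = ((PySem.List.pyRange 0 part 1).map (fun i =>
          ((i * PySem.Int.floordiv sumbytes part : Int),
            if i = part - 1 then i * PySem.Int.floordiv sumbytes part + PySem.Int.floordiv sumbytes part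
                + (sumbytes - PySem.Int.floordiv sumbytes part * part)
            else i * PySem.Int.floordiv sumbytes part + PySem.Int.floordiv sumbytes part))).filter
          (fun p => p ≠ ((0 : Int), (0 : Int))) := by
  have hp' : ¬ part ≤ 0 := by omega
  simp only [slicing_file, if_neg hp']
  set each := PySem.Int.floordiv sumbytes part with heach
  have hbody : (fun (acc : List (Int × Int)) (i : Int) =>
      if i * each = 0 ∧
          (if i = part - 1 then i * each + each + (sumbytes - each * part)
           else i * each + each) = 0 then acc
      else acc ++ [(i * each,
          if i = part - 1 then i * each + each + (sumbytes - each * part)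
          else i * each + each)])
    = (fun (acc : List (Int × Int)) (i : Int) =>
      if decide (((i * each,
          if i = part - 1 then i * each + each + (sumbytes - each * part)
          else i * each + each) : Int × Int) ≠ ((0 : Int), (0 : Int))) = true then
        acc ++ [(i * each,
          if i = part - 1 then i * each + each + (sumbytes - each * part)
          else i * each + each)]
      else acc) := by
    funext acc i
    split_ifs with h1 h2 <;> simp_all [Prod.ext_iff]
  rw [hbody]
  rw [PySem.List.foldl_append_if
    (fun i => ((i * each,
        if i = part - 1 then i * each + each + (sumbytes - each * part)
        else i * each + each) : Int × Int) ≠ ((0 : Int), (0 : Int)))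
    (fun i => ((i * each,
        if i = part - 1 then i * each + each + (sumbytes - each * part)
        else i * each + each) : Int × Int))]
  rw [List.filter_map]
  simp only [List.nil_append, Function.comp_def]

-- ===== VERDICT (by name: the statement is the Claim_ definition above) =====
theorem slicing_file_spec : Claim_equal_slicing_file := by
  intro sumbytes part _
  unfold Spec_slicing_file slicing_file_alt
  by_cases hp : part ≤ 0
  · rw [slicingAltLoop]
    unfold slicing_file
    simp [show ¬ (0 < part) from by omega, hp]
  · have hppos : 0 < part := by omega
    set each := PySem.Int.floordiv sumbytes part with heach
    -- unfold the first iteration of B's loop (the only one whose division sees the remainder)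
    rw [slicingAltLoop]
    simp only [dif_pos hppos]
    rw [← heach]
    rw [slicingAltLoop_mult each (part - 1).toNat (part - 1) rfl]
    rw [slicing_file_closed sumbytes part hppos, ← heach]
    -- split A's range at part - 1
    have hsplit : PySem.List.pyRange 0 part 1
        = PySem.List.pyRange 0 (part - 1) 1 ++ [part - 1] := by
      have h := PySem.List.pyRange_one_succ_right (show (0 : Int) ≤ part - 1 from by omega)
      rw [show part - 1 + 1 = part from by omega] at h
      exact h
    rw [hsplit]
    simp only [List.map_append, List.filter_append, List.map_cons, List.map_nil,
      List.filter_cons, List.filter_nil, List.reverse_append]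
    have hlast : (part - 1) * each + each + (sumbytes - each * part) = sumbytes := by ring
    have hmapeq : (PySem.List.pyRange 0 (part - 1) 1).map (fun i =>
        ((i * each : Int),
          if i = part - 1 then i * each + each + (sumbytes - each * part)
          else i * each + each))
      = (PySem.List.pyRange 0 (part - 1) 1).map (fun i => ((i * each : Int), (i + 1) * each)) := by
      apply List.map_congr_left
      intro i hi
      have := (PySem.List.mem_pyRange_one).1 hi
      have hne : i ≠ part - 1 := by omega
      simp only [if_neg hne, Prod.mk.injEq, true_and]
      ring
    simp only [hlast] at *
    rw [hmapeq]
    by_cases hz : (((part - 1) * each : Int), sumbytes) = ((0 : Int), (0 : Int))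
    · simp [hz]
    · simp [hz]
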